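-- pv_equiv track=rewrite | github.com/GeneticxCln/OpenAgent-Terminal | backend/openagent_terminal/session.py | _escape_markdown_content
-- ===== SOURCE A (Python) =====
-- def _escape_markdown_content(content: str) -> str:
--     """Escape markdown special characters in content.
--
--     Args:
--         content: Content to escape
--
--     Returns:
--         Escaped content
--     """
--     # Don't escape code blocks
--     if content.strip().startswith("```"):
--         return content
--
--     # Escape markdown headers at line start
--     lines = []
--     for line in content.split('\n'):
--         if line.startswith('#'):
--             line = '\\' + line
--         lines.append(line)
--
--     return '\n'.join(lines)
-- ===== SOURCE B (Python) =====
-- import re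
--
-- _HEADER_RE = re.compile(r"^#", re.MULTILINE)
--
--
-- def _escape_markdown_content(content: str) -> str:
--     """Escape markdown headers via one multiline regex substitution."""
--     # Don't escape code blocks
--     if content.strip().startswith("```"):
--         return content
--     # '^' with MULTILINE anchors at the string start and after every '\n'.
--     return _HEADER_RE.sub(r"\\#", content)
-- ===== Notes on version B (the rewrite author's own statement) =====
-- stated objective: idiomatic
-- what changed: Replaced the split-into-lines loop with its accumulator and re-join by a single precompiled multiline regex substitution that anchors at every line start and prepends a backslash to a leading hash; the code-block guard is unchanged.
import Mathlib
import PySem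

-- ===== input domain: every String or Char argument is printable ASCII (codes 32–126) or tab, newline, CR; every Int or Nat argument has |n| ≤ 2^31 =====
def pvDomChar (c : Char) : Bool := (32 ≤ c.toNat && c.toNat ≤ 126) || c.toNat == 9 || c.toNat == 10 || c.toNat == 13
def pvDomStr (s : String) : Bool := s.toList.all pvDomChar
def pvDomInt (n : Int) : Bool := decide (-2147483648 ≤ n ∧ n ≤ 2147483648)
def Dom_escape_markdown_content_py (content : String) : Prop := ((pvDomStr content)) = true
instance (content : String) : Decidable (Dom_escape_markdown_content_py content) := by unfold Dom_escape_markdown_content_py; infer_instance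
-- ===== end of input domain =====

-- B replaces A's split/loop/join over lines by a single anchored scan (Python: one multiline
-- regex substitution) that escapes a leading '#' at every line start; objective: idiomatic.

-- ===== PORT A =====
-- A: guard on code blocks, then split on '\n', prefix '\' to lines starting with '#', join back.
def escape_markdown_content_py (content : String) : String :=
  if PySem.Str.startswith (PySem.Str.strip content) "```" then content
  else
    let lines : List String :=
      ((PySem.Str.split? content "\n").getD []).foldl
        (fun acc line =>
          acc ++ [if PySem.Str.startswith line "#" then "\\" ++ line else line]) []
    PySem.Str.join "\n" lines

-- ===== PORT B =====
-- B: the same guard, then one left-to-right scan emulating re.sub(r'^#', r'\#', ·, re.MULTILINE):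
-- the Bool state is "at a line start" (string start, or just after '\n'), exactly the positions
-- where MULTILINE '^' matches; a '#' there gets a '\' prepended.  Exact for this pattern.
def pvScanB : Bool → List Char → List Char
  | _, [] => []
  | atStart, c :: rest =>
      if atStart && (c == '#') then '\\' :: c :: pvScanB false rest
      else c :: pvScanB (c == '\n') rest

def escape_markdown_content_py_alt (content : String) : String :=
  if PySem.Str.startswith (PySem.Str.strip content) "```" then content
  else String.ofList (pvScanB true content.toList)

-- ===== PRECONDITION & SPEC =====
def Spec_escape_markdown_content_py (content : String) (out : String) : Prop := out = escape_markdown_content_py_alt content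
instance (content : String) (out : String) : Decidable (Spec_escape_markdown_content_py content out) := by unfold Spec_escape_markdown_content_py; infer_instance

-- ===== CLAIM (what is proved, stated in full; the proofs are below) =====
def Claim_equal_escape_markdown_content_py : Prop := ∀ (content : String), Dom_escape_markdown_content_py content → Spec_escape_markdown_content_py content (escape_markdown_content_py content)

-- ===== LEMMAS AND PROOFS =====

-- reference splitter: split a char list on '\n', with `pre` the partial current line
def splitNL (pre : List Char) : List Char → List (List Char)
  | [] => [pre]
  | c :: r => if c = '\n' then pre :: splitNL [] r else splitNL (pre ++ [c]) r

-- per-line escape, at char level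
def escLine (l : List Char) : List Char :=
  if PySem.Chars.startswith l ['#'] then '\\' :: l else l

lemma splitNL_ne_nil (l pre : List Char) : splitNL pre l ≠ [] := by
  induction l generalizing pre with
  | nil => simp [splitNL]
  | cons c r ih =>
    simp only [splitNL]
    split_ifs
    · simp
    · exact ih _

lemma splitNL_shape (l : List Char) (pre : List Char) :
    splitNL pre l = (pre ++ (splitNL [] l).headI) :: (splitNL [] l).tail := by
  induction l generalizing pre with
  | nil => simp [splitNL]
  | cons c r ih =>
    by_cases hc : c = '\n'
    · simp [splitNL, hc]
    · rw [show splitNL pre (c :: r) = splitNL (pre ++ [c]) r by simp [splitNL, hc],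
        show splitNL [] (c :: r) = splitNL [c] r by simp [splitNL, hc],
        ih (pre ++ [c]), ih [c]]
      simp

lemma go_eq : ∀ (fuel : Nat) (l cur : List Char) (acc : List (List Char)),
    l.length ≤ fuel →
    PySem.Chars.splitOn.go ['\n'] fuel l cur acc = acc.reverse ++ splitNL cur.reverse l := by
  intro fuel
  induction fuel with
  | zero =>
    intro l cur acc h
    have : l = [] := List.eq_nil_of_length_eq_zero (Nat.le_zero.mp h)
    subst this
    rw [PySem.Chars.splitOn.go.eq_def]
    simp [splitNL]
  | succ fuel ih =>
    intro l cur acc h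
    cases l with
    | nil =>
      rw [PySem.Chars.splitOn.go.eq_def]
      simp [splitNL]
    | cons c rest =>
      rw [PySem.Chars.splitOn.go.eq_def]
      by_cases hc : c = '\n'
      · subst hc
        have hpre : (['\n'].isPrefixOf ('\n' :: rest)) = true := by
          simp [List.isPrefixOf]
        simp only [hpre, if_pos rfl, List.length_cons, List.length_nil, Nat.zero_add,
          List.drop_one, List.tail_cons]
        rw [ih rest [] (cur.reverse :: acc) (by simpa using Nat.le_of_succ_le_succ h)]
        simp [splitNL]
      · have hpre : (['\n'].isPrefixOf (c :: rest)) = false := by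
          simp [List.isPrefixOf]
          exact fun h => absurd h.symm hc
        simp only [hpre, Bool.false_eq_true, if_false]
        rw [ih rest (c :: cur) acc (by simpa using Nat.le_of_succ_le_succ h)]
        simp [splitNL, hc]

lemma splitOn_eq_splitNL (l : List Char) :
    PySem.Chars.splitOn l ['\n'] = splitNL [] l := by
  have := go_eq (l.length + 1) l [] [] (by omega)
  simpa [PySem.Chars.splitOn] using this

-- join with the FIRST line escaped iff b; every later line escaped
def pvJoinEsc (b : Bool) : List (List Char) → List Char
  | [] => []
  | [h] => if b then escLine h else h
  | h :: h' :: t => (if b then escLine h else h) ++ '\n' :: pvJoinEsc true (h' :: t)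

lemma intercalate_cons₂ (sep a b : List Char) (l : List (List Char)) :
    List.intercalate sep (a :: b :: l) = a ++ sep ++ List.intercalate sep (b :: l) := by
  simp [List.intercalate, List.intersperse]

lemma pvJoinEsc_eq_join (ls : List (List Char)) :
    pvJoinEsc true ls = PySem.Chars.join ['\n'] (ls.map escLine) := by
  induction ls with
  | nil => simp [pvJoinEsc, PySem.Chars.join, List.intercalate]
  | cons h t ih =>
    cases t with
    | nil => simp [pvJoinEsc, PySem.Chars.join, List.intercalate]
    | cons h' t' =>
      rw [show pvJoinEsc true (h :: h' :: t') =
          escLine h ++ '\n' :: pvJoinEsc true (h' :: t') by simp [pvJoinEsc], ih]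
      simp only [List.map_cons, PySem.Chars.join, intercalate_cons₂]
      simp

lemma escLine_cons (c : Char) (h : List Char) :
    escLine (c :: h) = if c = '#' then '\\' :: c :: h else c :: h := by
  have hs : PySem.Chars.startswith (c :: h) ['#'] = ('#' == c) := by
    simp [PySem.Chars.startswith, List.isPrefixOf]
  by_cases hc : c = '#'
  · subst hc; simp [escLine, PySem.Chars.startswith, List.isPrefixOf]
  · have hb : ('#' == c) = false := by rw [beq_eq_false_iff_ne]; exact Ne.symm hc
    simp [escLine, hs, hb, hc]

lemma scan_eq (l : List Char) : ∀ b : Bool,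
    pvJoinEsc b (splitNL [] l) = pvScanB b l := by
  induction l with
  | nil =>
    intro b
    cases b <;> simp [splitNL, pvJoinEsc, pvScanB, escLine, PySem.Chars.startswith,
      List.isPrefixOf]
  | cons c r ih =>
    intro b
    rcases hsh : splitNL [] r with _ | ⟨hh, tt⟩
    · exact absurd hsh (splitNL_ne_nil r [])
    by_cases hc : c = '\n'
    · subst hc
      have hIHt := ih true; rw [hsh] at hIHt
      have h1 : splitNL [] ('\n' :: r) = [] :: hh :: tt := by simp [splitNL, hsh]
      have h2 : escLine [] = [] := by
        simp [escLine, PySem.Chars.startswith, List.isPrefixOf]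
      rw [h1, show pvJoinEsc b ([] :: hh :: tt) =
          (if b then escLine [] else []) ++ '\n' :: pvJoinEsc true (hh :: tt) from by
            simp [pvJoinEsc], hIHt, h2]
      cases b <;> simp [pvScanB]
    · have hstep : splitNL [] (c :: r) = (c :: hh) :: tt := by
        rw [show splitNL [] (c :: r) = splitNL [c] r from by simp [splitNL, hc],
          splitNL_shape r [c], hsh]
        simp
      have hcn : (c == '\n') = false := by simp [hc]
      have hIHf := ih false; rw [hsh] at hIHf
      rw [hstep]
      cases tt with
      | nil =>
        have hIH' : hh = pvScanB false r := by simpa [pvJoinEsc] using hIHf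
        rw [show pvJoinEsc b [c :: hh] =
            (if b then escLine (c :: hh) else c :: hh) from by simp [pvJoinEsc],
          escLine_cons]
        cases b <;> by_cases hh' : c = '#' <;>
          simp [pvScanB, hcn, hh', ← hIH']
      | cons h' t' =>
        have hIH' : hh ++ '\n' :: pvJoinEsc true (h' :: t') = pvScanB false r := by
          simpa [pvJoinEsc] using hIHf
        rw [show pvJoinEsc b ((c :: hh) :: h' :: t') =
            (if b then escLine (c :: hh) else c :: hh) ++ '\n' :: pvJoinEsc true (h' :: t')
            from by simp [pvJoinEsc],
          escLine_cons]
        cases b <;> by_cases hh' : c = '#' <;>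
          simp [pvScanB, hcn, hh', ← hIH']

-- A's foldl-append loop is a map
lemma lines_foldl_eq_map (ls : List String) (f : String → String) :
    ls.foldl (fun acc line => acc ++ [f line]) [] = ls.map f := by
  simpa using PySem.List.foldl_append_singleton_eq_map f ls []

-- ===== VERDICT (by name: the statement is the Claim_ definition above) =====
theorem escape_markdown_content_py_spec : Claim_equal_escape_markdown_content_py := by
  intro content _
  unfold Spec_escape_markdown_content_py escape_markdown_content_py escape_markdown_content_py_alt
  by_cases hg : PySem.Str.startswith (PySem.Str.strip content) "```" = true
  · rw [if_pos hg, if_pos hg]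
  · rw [if_neg hg, if_neg hg]
    rw [lines_foldl_eq_map]
    have hsplit : PySem.Str.split? content "\n" =
        some ((splitNL [] content.toList).map String.ofList) := by
      simp only [PySem.Str.split?, PySem.Chars.split?]
      rw [show ("\n" : String).toList = ['\n'] from rfl]
      rw [if_neg (by decide : ¬ ((['\n'] : List Char).isEmpty = true))]
      rw [splitOn_eq_splitNL]
      rfl
    rw [hsplit]
    simp only [Option.getD_some, List.map_map]
    have hmap : ((fun line => if PySem.Str.startswith line "#" then "\\" ++ line else line) ∘
          String.ofList) = fun x => String.ofList (escLine x) := by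
      funext x
      simp only [Function.comp, escLine, PySem.Str.startswith, String.toList_ofList]
      rw [show ("#" : String).toList = ['#'] from rfl]
      split_ifs with h
      · apply String.toList_injective; simp
      · rfl
    rw [hmap, PySem.Str.join]
    apply congrArg String.ofList
    rw [← scan_eq content.toList true, pvJoinEsc_eq_join]
    simp only [List.map_map]
    congr 1
    apply List.map_congr_left
    intro x _
    simp [Function.comp]
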